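-- pv_equiv track=rewrite | github.com/johBac97/mirex2025-musecoco | utils_midi/remi_utils_bak.py | reorder_tgt
-- ===== SOURCE A (Python) =====
-- def get_inst_in_remi(remi_seq):
--     '''
--     Obtain all instrument in the input remi sequence
--     Return a list of instrument tokens
--     Sort by program id
--     '''
--     inst = set()
--     for token in remi_seq:
--         if token.startswith("i-"):
--             inst.add(token)
--     inst = list(inst)
--     inst = sorted(inst, key=lambda x: int(x.split("-")[1]))  # sort by inst id
--     return inst
--
-- def reorder_tgt(remi_seq):
--     '''
--     Re-order the target sequence, so that it become track-by-track, instead of mixing together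
--
--     Notes in remi seq can be either
--     - o i p d
--     - i p d
--     - p d
--
--     In return:
--     - i o p d o p d ...  i o p d p d o p d
--     '''
--     seq_of_inst = {}
--     insts = get_inst_in_remi(remi_seq) # Get inst, sort by program id
--
--     if len(remi_seq) > 1 and len(insts) == 0:
--         insts = ['i-0']
--
--     for inst in insts:
--         seq_of_inst[inst] =  []
--
--
--         # t = []
--
--         # in_seq = False
--         # cur_inst = None
--         # for tok in remi_seq:
--
--
--         # seq_of_inst[inst] = t
--
--
--     pre_pos = None
--     cur_pos = None
--     pre_inst = None
--     cur_inst = None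
--     cur_p = None
--     cur_dur = None
--     for tok in remi_seq:
--         if tok.startswith('o-'):
--             cur_pos = tok
--         elif tok.startswith('i-'):
--             cur_inst = tok
--         elif tok.startswith('p-'):
--             cur_p = tok
--         elif tok.startswith('d-'):
--             cur_dur = tok
--
--             # If no instrument, set to the first instrument
--             if cur_inst is None:
--                 cur_inst = insts[0]
--
--             # Add the note to its corresponding sequence
--             if cur_inst != pre_inst and cur_inst is not None: # If for new inst
--                 seq_of_inst[cur_inst].append(cur_pos)
--             else: # If for a same instrument
--                 if pre_pos is not None and cur_pos == pre_pos: # If for same position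
--                     pass # No need to add pos token
--                 else:   # If for different position
--                     seq_of_inst[cur_inst].append(cur_pos) # should add pos token
--             seq_of_inst[cur_inst].append(cur_p)
--             seq_of_inst[cur_inst].append(cur_dur)
--
--             pre_pos = cur_pos
--             pre_inst = cur_inst
--
--     ret = []
--     for inst in seq_of_inst:
--         ret.append(inst)
--         ret.extend(seq_of_inst[inst])
--
--     return ret
-- ===== SOURCE B (Python) =====
-- def reorder_tgt(remi_seq):
--     # Pass 1: one scan collecting distinct instrument tokens and parsed note
--     # records (inst, pos, pitch, dur); pass 2 groups records per instrument.
--     insts = []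
--     notes = []
--     pos = inst = pitch = None
--     for tok in remi_seq:
--         if tok.startswith("o-"):
--             pos = tok
--         elif tok.startswith("i-"):
--             inst = tok
--             if tok not in insts:
--                 insts.append(tok)
--         elif tok.startswith("p-"):
--             pitch = tok
--         elif tok.startswith("d-"):
--             notes.append((inst, pos, pitch, tok))
--     insts.sort(key=lambda t: int(t.split("-")[1]))
--     if not insts and len(remi_seq) > 1:
--         insts = ["i-0"]
--     tracks = {t: [] for t in insts}
--     prev_inst = prev_pos = None
--     for inst, pos, pitch, dur in notes:
--         if inst is None:
--             inst = insts[0]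
--         track = tracks[inst]
--         if inst != prev_inst or pos != prev_pos:
--             track.append(pos)
--         track.append(pitch)
--         track.append(dur)
--         prev_inst, prev_pos = inst, pos
--     out = []
--     for inst, toks in tracks.items():
--         out.append(inst)
--         out.extend(toks)
--     return out
-- ===== Notes on version B (the rewrite author's own statement) =====
-- stated objective: alternative
-- what changed: B makes one parsing pass that collects the deduplicated instrument list and emits note records (inst, pos, pitch, dur), then a second pass groups the records into per-instrument tracks with a single combined position test, instead of A's one loop that interleaves register tracking with nested conditional dict mutation and a separate set+sorted helper.
-- outside the precondition, e.g. on reorder_tgt(['i-3', 'i-03']): A returns ['i-03', 'i-3'], B returns ['i-3', 'i-03']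
import Mathlib
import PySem

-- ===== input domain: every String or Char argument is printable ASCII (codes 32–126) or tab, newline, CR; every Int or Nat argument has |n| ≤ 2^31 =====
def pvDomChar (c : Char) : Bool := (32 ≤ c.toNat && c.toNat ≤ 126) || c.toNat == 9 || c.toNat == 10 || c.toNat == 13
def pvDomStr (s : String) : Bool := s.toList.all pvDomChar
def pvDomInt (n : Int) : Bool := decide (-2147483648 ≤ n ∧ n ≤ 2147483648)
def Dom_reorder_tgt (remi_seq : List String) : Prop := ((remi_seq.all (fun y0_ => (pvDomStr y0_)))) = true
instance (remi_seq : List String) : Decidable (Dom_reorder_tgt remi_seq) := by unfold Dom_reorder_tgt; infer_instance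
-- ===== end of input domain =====

-- B re-decomposes A: one parsing pass emitting note records plus a deduped instrument
-- list, then a grouping pass over the records; same return value on Pre_ (proved below).

-- ===== PORT A =====

-- int(x.split("-")[1]) ; the '.getD' defaults mark Python's IndexError/ValueError, unreachable under Pre_
def pvKeyA (t : String) : Int :=
  ((PySem.List.pyGet? ((PySem.Str.split? t "-").getD []) 1).bind PySem.Int.ofStr?).getD 0

def get_inst_in_remi (remi_seq : List String) : List String :=
  let inst : PySem.Set String :=
    remi_seq.foldl (fun s token => if PySem.Str.startswith token "i-" then PySem.Set.add s token else s)
      PySem.Set.empty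
  PySem.List.sorted inst pvKeyA

structure AState where
  d : PySem.Dict String (List String)
  prePos : Option String
  curPos : Option String
  preInst : Option String
  curInst : Option String
  curP : Option String
deriving Repr, DecidableEq

-- the body of A's main 'for tok in remi_seq' loop
def aStep (insts : List String) (s : AState) (tok : String) : AState :=
  if PySem.Str.startswith tok "o-" then { s with curPos := some tok }
  else if PySem.Str.startswith tok "i-" then { s with curInst := some tok }
  else if PySem.Str.startswith tok "p-" then { s with curP := some tok }
  else if PySem.Str.startswith tok "d-" then
    let curDur := tok
    -- 'cur_inst = insts[0]' when None; '.getD ""' marks the IndexError (excluded by Pre_)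
    let curInst : String := s.curInst.getD ((PySem.List.pyGet? insts 0).getD "")
    -- appended cur_pos / cur_p are Python None outside Pre_; '.getD ""' marks that
    let d1 :=
      if some curInst ≠ s.preInst ∧ some curInst ≠ (none : Option String) then
        s.d.modify curInst [] (fun l => l ++ [s.curPos.getD ""])
      else if s.prePos ≠ (none : Option String) ∧ s.curPos = s.prePos then s.d
      else s.d.modify curInst [] (fun l => l ++ [s.curPos.getD ""])
    let d2 := d1.modify curInst [] (fun l => l ++ [s.curP.getD ""])
    let d3 := d2.modify curInst [] (fun l => l ++ [curDur])
    { d := d3, prePos := s.curPos, curPos := s.curPos, preInst := some curInst,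
      curInst := some curInst, curP := s.curP }
  else s

def reorder_tgt (remi_seq : List String) : List String :=
  let insts0 := get_inst_in_remi remi_seq
  let insts := if PySem.List.len remi_seq > 1 ∧ PySem.List.len insts0 = 0 then ["i-0"] else insts0
  let seq_of_inst : PySem.Dict String (List String) :=
    insts.foldl (fun d inst => d.insert inst []) PySem.Dict.empty
  let fin := remi_seq.foldl (aStep insts) ⟨seq_of_inst, none, none, none, none, none⟩
  fin.d.items.foldl (fun ret p => (ret ++ [p.1]) ++ p.2) []

-- ===== PORT B =====

-- a parsed note record (inst, pos, pitch, dur)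
abbrev BNote := Option String × Option String × Option String × String

structure BScan where
  insts : List String
  notes : List BNote
  pos : Option String
  inst : Option String
  pitch : Option String
deriving Repr, DecidableEq

-- the body of B's parsing loop
def bScanStep (s : BScan) (tok : String) : BScan :=
  if PySem.Str.startswith tok "o-" then { s with pos := some tok }
  else if PySem.Str.startswith tok "i-" then
    { s with inst := some tok,
             insts := if tok ∈ s.insts then s.insts else s.insts ++ [tok] }
  else if PySem.Str.startswith tok "p-" then { s with pitch := some tok }
  else if PySem.Str.startswith tok "d-" then
    { s with notes := s.notes ++ [(s.inst, s.pos, s.pitch, tok)] }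
  else s

-- int(t.split("-")[1]) ; defaults as in pvKeyA
def pvKeyB (t : String) : Int :=
  ((PySem.List.pyGet? ((PySem.Str.split? t "-").getD []) 1).bind PySem.Int.ofStr?).getD 0

-- the body of B's grouping loop; state = (tracks, prev_inst, prev_pos)
def bNoteStep (insts : List String)
    (st : PySem.Dict String (List String) × Option String × Option String) (n : BNote) :
    PySem.Dict String (List String) × Option String × Option String :=
  let inst : String := n.1.getD ((PySem.List.pyGet? insts 0).getD "")
  let pos := n.2.1
  let track := st.1.getD inst []
  let track := if some inst ≠ st.2.1 ∨ pos ≠ st.2.2 then track ++ [pos.getD ""] else track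
  let track := track ++ [n.2.2.1.getD ""]
  let track := track ++ [n.2.2.2]
  (st.1.insert inst track, some inst, pos)

def reorder_tgt_alt (remi_seq : List String) : List String :=
  let sc := remi_seq.foldl bScanStep ⟨[], [], none, none, none⟩
  let insts0 := PySem.List.sorted sc.insts pvKeyB
  let insts := if insts0 = [] ∧ PySem.List.len remi_seq > 1 then ["i-0"] else insts0
  let tracks : PySem.Dict String (List String) :=
    insts.foldl (fun d t => d.insert t []) PySem.Dict.empty
  let fin := sc.notes.foldl (bNoteStep insts) (tracks, none, none)
  fin.1.items.foldl (fun out p => (out ++ [p.1]) ++ p.2) []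

-- ===== PRECONDITION & SPEC =====

-- Pre_ excludes: i-tokens whose id part is not a Python int (A raises ValueError in sorted's key);
-- two distinct i-tokens with the same numeric id (A's output order there is CPython set-hash order);
-- and any d-token not preceded by both an o- and a p-token (A returns a list containing None, or
-- raises IndexError on a lone d-token).
def Pre_reorder_tgt (remi_seq : List String) : Prop :=
  (∀ t ∈ remi_seq, PySem.Str.startswith t "i-" = true →
      ((PySem.List.pyGet? ((PySem.Str.split? t "-").getD []) 1).bind PySem.Int.ofStr?).isSome = true) ∧
  (∀ t₁ ∈ remi_seq, ∀ t₂ ∈ remi_seq, PySem.Str.startswith t₁ "i-" = true →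
      PySem.Str.startswith t₂ "i-" = true →
      ((PySem.List.pyGet? ((PySem.Str.split? t₁ "-").getD []) 1).bind PySem.Int.ofStr?) =
        ((PySem.List.pyGet? ((PySem.Str.split? t₂ "-").getD []) 1).bind PySem.Int.ofStr?) → t₁ = t₂) ∧
  (∀ (k : Nat) (hk : k < remi_seq.length), PySem.Str.startswith remi_seq[k] "d-" = true →
      (∃ j, ∃ _ : j < k, PySem.Str.startswith remi_seq[j] "o-" = true) ∧
      (∃ j, ∃ _ : j < k, PySem.Str.startswith remi_seq[j] "p-" = true))

instance (remi_seq : List String) : Decidable (Pre_reorder_tgt remi_seq) := by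
  unfold Pre_reorder_tgt; infer_instance

def pvWitness_reorder_tgt : List String := ["i-3", "o-1", "p-60", "d-2", "i-1", "p-7", "d-4"]

def Spec_reorder_tgt (remi_seq : List String) (out : List String) : Prop := out = reorder_tgt_alt remi_seq
instance (remi_seq : List String) (out : List String) : Decidable (Spec_reorder_tgt remi_seq out) := by
  unfold Spec_reorder_tgt; infer_instance

-- ===== CLAIM (what is proved, stated in full; the proofs are below) =====
def Claim_equal_reorder_tgt : Prop := ∀ (remi_seq : List String), Dom_reorder_tgt remi_seq → Pre_reorder_tgt remi_seq → Spec_reorder_tgt remi_seq (reorder_tgt remi_seq)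

-- ===== LEMMAS AND PROOFS =====

-- two-character prefixes with different first characters are mutually exclusive
theorem pv_sw_ne (t : String) (a b : Char) (hne : a ≠ b)
    (h : PySem.Str.startswith t (String.ofList [a, '-']) = true) :
    PySem.Str.startswith t (String.ofList [b, '-']) = false := by
  simp only [PySem.Str.startswith, PySem.Chars.startswith, String.toList_ofList,
    List.isPrefixOf_iff_prefix] at h ⊢
  rw [Bool.eq_false_iff]
  intro hcon
  rw [List.isPrefixOf_iff_prefix] at hcon
  cases hl : t.toList with
  | nil => rw [hl] at h; simp at h
  | cons c cs =>
    rw [hl, List.cons_prefix_cons] at h hcon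
    exact hne (h.1.trans hcon.1.symm)

-- B's scan collects exactly A's instrument set
theorem pv_scan_insts (rest : List String) (s : BScan) :
    (rest.foldl bScanStep s).insts =
      rest.foldl (fun l token => if PySem.Str.startswith token "i-" then PySem.Set.add l token else l)
        s.insts := by
  induction rest generalizing s with
  | nil => rfl
  | cons t ts ih =>
    simp only [List.foldl_cons]
    rw [ih]
    congr 1
    by_cases h1 : PySem.Str.startswith t "o-" = true
    · have h2 : PySem.Str.startswith t "i-" = false := pv_sw_ne t 'o' 'i' (by decide) h1
      unfold bScanStep
      rw [if_pos h1, if_neg (by simpa [PySem.Str.startswith] using h2)]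
    · by_cases h2 : PySem.Str.startswith t "i-" = true
      · unfold bScanStep
        rw [if_neg h1, if_pos h2, if_pos h2]
        simp [PySem.Set.add, PySem.Set.contains]
      · by_cases h3 : PySem.Str.startswith t "p-" = true
        · unfold bScanStep
          rw [if_neg h1, if_neg h2, if_pos h3, if_neg h2]
        · by_cases h4 : PySem.Str.startswith t "d-" = true
          · unfold bScanStep
            rw [if_neg h1, if_neg h2, if_neg h3, if_pos h4, if_neg h2]
          · unfold bScanStep
            rw [if_neg h1, if_neg h2, if_neg h3, if_neg h4, if_neg h2]

-- the note records B's scan emits, as a function of the running registers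
def notesOf (o i p : Option String) : List String → List BNote
  | [] => []
  | t :: ts =>
    if PySem.Str.startswith t "o-" then notesOf (some t) i p ts
    else if PySem.Str.startswith t "i-" then notesOf o (some t) p ts
    else if PySem.Str.startswith t "p-" then notesOf o i (some t) ts
    else if PySem.Str.startswith t "d-" then (i, o, p, t) :: notesOf o i p ts
    else notesOf o i p ts

theorem pv_scan_notes (rest : List String) (s : BScan) :
    (rest.foldl bScanStep s).notes = s.notes ++ notesOf s.pos s.inst s.pitch rest := by
  induction rest generalizing s with
  | nil => simp [notesOf]
  | cons t ts ih =>
    simp only [List.foldl_cons]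
    rw [ih]
    simp only [notesOf]
    by_cases h1 : PySem.Str.startswith t "o-" = true
    · unfold bScanStep
      rw [if_pos h1, if_pos h1]
    · by_cases h2 : PySem.Str.startswith t "i-" = true
      · unfold bScanStep
        rw [if_neg h1, if_pos h2, if_neg h1, if_pos h2]
      · by_cases h3 : PySem.Str.startswith t "p-" = true
        · unfold bScanStep
          rw [if_neg h1, if_neg h2, if_pos h3, if_neg h1, if_neg h2, if_pos h3]
        · by_cases h4 : PySem.Str.startswith t "d-" = true
          · unfold bScanStep
            rw [if_neg h1, if_neg h2, if_neg h3, if_pos h4,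
              if_neg h1, if_neg h2, if_neg h3, if_pos h4]
            simp [List.append_assoc]
          · unfold bScanStep
            rw [if_neg h1, if_neg h2, if_neg h3, if_neg h4,
              if_neg h1, if_neg h2, if_neg h3, if_neg h4]

-- how a note's instrument register is resolved (insts[0] for None)
def resolveI (insts : List String) (o : Option String) : String :=
  o.getD ((PySem.List.pyGet? insts 0).getD "")

-- shifting the o-before-d hypothesis past a non-'o-' head token
theorem pv_ho_shift (t : String) (ts : List String) (oA : Option String)
    (h1 : ¬ PySem.Str.startswith t "o-" = true)
    (ho : ∀ (k : Nat) (hk : k < (t :: ts).length), PySem.Str.startswith (t :: ts)[k] "d-" = true →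
        oA ≠ none ∨ ∃ j, ∃ _ : j < k, PySem.Str.startswith (t :: ts)[j] "o-" = true) :
    ∀ (k : Nat) (hk : k < ts.length), PySem.Str.startswith ts[k] "d-" = true →
        oA ≠ none ∨ ∃ j, ∃ _ : j < k, PySem.Str.startswith ts[j] "o-" = true := by
  intro k hk hd
  rcases ho (k + 1) (by simpa using hk) (by simpa using hd) with h | ⟨j, hj, hsw⟩
  · exact Or.inl h
  · cases j with
    | zero => exact absurd (by simpa using hsw) h1
    | succ j' => exact Or.inr ⟨j', by omega, by simpa using hsw⟩

-- the fusion lemma: A's interleaved loop builds the same dict as B's grouping pass over the records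
theorem pv_fuse (insts rest : List String) (d : PySem.Dict String (List String))
    (oA iA pA iB preI preP : Option String)
    (hres : resolveI insts iA = resolveI insts iB)
    (hinv : preI = none ∨ preP ≠ none)
    (ho : ∀ (k : Nat) (hk : k < rest.length), PySem.Str.startswith rest[k] "d-" = true →
        oA ≠ none ∨ ∃ j, ∃ _ : j < k, PySem.Str.startswith rest[j] "o-" = true) :
    (rest.foldl (aStep insts) ⟨d, preP, oA, preI, iA, pA⟩).d =
      ((notesOf oA iB pA rest).foldl (bNoteStep insts) (d, preI, preP)).1 := by
  induction rest generalizing d oA iA pA iB preI preP with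
  | nil => rfl
  | cons t ts ih =>
    simp only [List.foldl_cons]
    by_cases h1 : PySem.Str.startswith t "o-" = true
    · have hA : aStep insts ⟨d, preP, oA, preI, iA, pA⟩ t = ⟨d, preP, some t, preI, iA, pA⟩ := by
        unfold aStep; rw [if_pos h1]
      rw [hA]
      simp only [notesOf]
      rw [if_pos h1]
      exact ih d (some t) iA pA iB preI preP hres hinv (fun k hk hd => Or.inl (by simp))
    · by_cases h2 : PySem.Str.startswith t "i-" = true
      · have hA : aStep insts ⟨d, preP, oA, preI, iA, pA⟩ t = ⟨d, preP, oA, preI, some t, pA⟩ := by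
          unfold aStep; rw [if_neg h1, if_pos h2]
        rw [hA]
        simp only [notesOf]
        rw [if_neg h1, if_pos h2]
        exact ih d oA (some t) pA (some t) preI preP rfl hinv (pv_ho_shift t ts oA h1 ho)
      · by_cases h3 : PySem.Str.startswith t "p-" = true
        · have hA : aStep insts ⟨d, preP, oA, preI, iA, pA⟩ t = ⟨d, preP, oA, preI, iA, some t⟩ := by
            unfold aStep; rw [if_neg h1, if_neg h2, if_pos h3]
          rw [hA]
          simp only [notesOf]
          rw [if_neg h1, if_neg h2, if_pos h3]
          exact ih d oA iA (some t) iB preI preP hres hinv (pv_ho_shift t ts oA h1 ho)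
        · by_cases h4 : PySem.Str.startswith t "d-" = true
          · -- a note: both sides perform the same group update
            have hoA : oA ≠ none := by
              rcases ho 0 (by simp) (by simpa using h4) with h | ⟨j, hj, _⟩
              · exact h
              · omega
            simp only [notesOf]
            rw [if_neg h1, if_neg h2, if_neg h3, if_pos h4]
            simp only [List.foldl_cons]
            have hmod : ∀ (dd : PySem.Dict String (List String)) (k : String)
                (f : List String → List String), dd.modify k [] f = dd.insert k (f (dd.getD k [])) :=
              fun _ _ _ => rfl
            have hins : ∀ (v : List String) (f : List String → List String),
                (d.insert (resolveI insts iA) v).modify (resolveI insts iA) [] f =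
                  d.insert (resolveI insts iA) (f v) := by
              intro v f
              rw [hmod, PySem.Dict.getD_insert_self, PySem.Dict.insert_insert_self]
            have hstepA : aStep insts ⟨d, preP, oA, preI, iA, pA⟩ t =
                ⟨(if some (resolveI insts iA) ≠ preI ∧ some (resolveI insts iA) ≠ (none : Option String) then
                      d.insert (resolveI insts iA)
                        ((d.getD (resolveI insts iA) []) ++ [oA.getD ""] ++ [pA.getD ""] ++ [t])
                    else if preP ≠ (none : Option String) ∧ oA = preP then
                      d.insert (resolveI insts iA) ((d.getD (resolveI insts iA) []) ++ [pA.getD ""] ++ [t])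
                    else d.insert (resolveI insts iA)
                      ((d.getD (resolveI insts iA) []) ++ [oA.getD ""] ++ [pA.getD ""] ++ [t])),
                  oA, oA, some (resolveI insts iA), some (resolveI insts iA), pA⟩ := by
              unfold aStep
              rw [if_neg h1, if_neg h2, if_neg h3, if_pos h4]
              dsimp only
              rw [show iA.getD ((PySem.List.pyGet? insts 0).getD "") = resolveI insts iA from rfl]
              split_ifs with c1 c2
              · rw [hmod d, hins, hins]
              · rw [hmod d, hins]
              · rw [hmod d, hins, hins]
            have hstepB : bNoteStep insts (d, preI, preP) (iB, oA, pA, t) =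
                ((if some (resolveI insts iA) ≠ preI ∨ oA ≠ preP then
                      d.insert (resolveI insts iA)
                        ((d.getD (resolveI insts iA) []) ++ [oA.getD ""] ++ [pA.getD ""] ++ [t])
                    else d.insert (resolveI insts iA) ((d.getD (resolveI insts iA) []) ++ [pA.getD ""] ++ [t])),
                  some (resolveI insts iA), oA) := by
              unfold bNoteStep
              dsimp only
              rw [show iB.getD ((PySem.List.pyGet? insts 0).getD "") = resolveI insts iB from rfl,
                ← hres]
              split_ifs with c
              · rfl
              · rfl
            rw [hstepA, hstepB]
            have hcond : (if some (resolveI insts iA) ≠ preI ∧ some (resolveI insts iA) ≠ (none : Option String) then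
                  d.insert (resolveI insts iA)
                    ((d.getD (resolveI insts iA) []) ++ [oA.getD ""] ++ [pA.getD ""] ++ [t])
                else if preP ≠ (none : Option String) ∧ oA = preP then
                  d.insert (resolveI insts iA) ((d.getD (resolveI insts iA) []) ++ [pA.getD ""] ++ [t])
                else d.insert (resolveI insts iA)
                  ((d.getD (resolveI insts iA) []) ++ [oA.getD ""] ++ [pA.getD ""] ++ [t])) =
                (if some (resolveI insts iA) ≠ preI ∨ oA ≠ preP then
                  d.insert (resolveI insts iA)
                    ((d.getD (resolveI insts iA) []) ++ [oA.getD ""] ++ [pA.getD ""] ++ [t])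
                else d.insert (resolveI insts iA) ((d.getD (resolveI insts iA) []) ++ [pA.getD ""] ++ [t])) := by
              by_cases hip : some (resolveI insts iA) = preI
              · have hpp : preP ≠ none := by
                  rcases hinv with h | h
                  · rw [← hip] at h; exact absurd h (by simp)
                  · exact h
                by_cases hop : oA = preP
                · simp [hip, hop, hpp]
                · simp [hip, hop, hpp]
              · simp [hip]
            rw [hcond]
            exact ih _ oA (some (resolveI insts iA)) pA iB (some (resolveI insts iA)) oA hres
              (Or.inr hoA) (fun k hk hd => Or.inl hoA)
          · have hA : aStep insts ⟨d, preP, oA, preI, iA, pA⟩ t = ⟨d, preP, oA, preI, iA, pA⟩ := by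
              unfold aStep; rw [if_neg h1, if_neg h2, if_neg h3, if_neg h4]
            rw [hA]
            simp only [notesOf]
            rw [if_neg h1, if_neg h2, if_neg h3, if_neg h4]
            exact ih d oA iA pA iB preI preP hres hinv (pv_ho_shift t ts oA h1 ho)

-- ===== VERDICT (by name: the statement is the Claim_ definition above) =====
theorem reorder_tgt_spec : Claim_equal_reorder_tgt := by
  intro remi_seq hdom hpre
  unfold Spec_reorder_tgt
  obtain ⟨hparse, hinj, hod⟩ := hpre
  unfold reorder_tgt reorder_tgt_alt
  dsimp only
  have hsc : (remi_seq.foldl bScanStep ⟨[], [], none, none, none⟩).insts =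
      remi_seq.foldl (fun l token => if PySem.Str.startswith token "i-" then PySem.Set.add l token else l)
        ([] : List String) := pv_scan_insts remi_seq _
  have hkeys : pvKeyB = pvKeyA := rfl
  have hinsts0 : PySem.List.sorted (remi_seq.foldl bScanStep ⟨[], [], none, none, none⟩).insts pvKeyB =
      get_inst_in_remi remi_seq := by
    rw [hsc, hkeys]; rfl
  rw [hinsts0]
  have hif : (if get_inst_in_remi remi_seq = [] ∧ PySem.List.len remi_seq > 1 then ["i-0"]
        else get_inst_in_remi remi_seq) =
      (if PySem.List.len remi_seq > 1 ∧ PySem.List.len (get_inst_in_remi remi_seq) = 0 then ["i-0"]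
        else get_inst_in_remi remi_seq) := by
    by_cases h : get_inst_in_remi remi_seq = []
    · simp [h, PySem.List.len_eq, and_comm]
    · simp [h]
  rw [hif]
  set insts := if PySem.List.len remi_seq > 1 ∧ PySem.List.len (get_inst_in_remi remi_seq) = 0 then
      ["i-0"] else get_inst_in_remi remi_seq
  have hnotes : (remi_seq.foldl bScanStep ⟨[], [], none, none, none⟩).notes =
      notesOf none none none remi_seq := by
    rw [pv_scan_notes]; rfl
  rw [hnotes]
  have hdicts := pv_fuse insts remi_seq
      (insts.foldl (fun d inst => d.insert inst []) PySem.Dict.empty)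
      none none none none none none rfl (Or.inl rfl)
      (fun k hk hd => Or.inr (by
        rcases (hod k hk hd).1 with ⟨j, hj, hsw⟩
        exact ⟨j, hj, hsw⟩))
  rw [← hdicts]
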